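-- pv_equiv track=rewrite | github.com/jayounghoyos/competitiva | sexto_dia/iVer.py | solve
-- ===== SOURCE A (Python) =====
-- def solve(n):
--     initial = [1,1]
--     end = [1, 1]
--     ## puedo reducir el ciclo a la mitad
--     for i in range(2,6):
--         if n % i == 0 and end == [1,1]:
--             for j in range(5, 1, -1):
--                 if n % j == 0:
--                     end[0] = j
--                     break
--             end[1] = n // end[0]
--             break
--
--
--     ans = (end[0] - 1) + (end[1] - 1)
--     if ans == 0:
--         return n - 1
--     else:
--         return ans
-- ===== SOURCE B (Python) =====
-- # B: precomputed residue table mod 60 (lcm of 2..5): the answer depends on n only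
-- # through n % 60 for the divisor choice; one dict lookup replaces all trial divisions.
-- _TABLE = {r: max((j for j in (2, 3, 4, 5) if r % j == 0), default=0) for r in range(60)}
--
--
-- def solve(n):
--     j = _TABLE[n % 60]
--     if j == 0:
--         return n - 1
--     return j + n // j - 2
-- ===== Notes on version B (the rewrite author's own statement) =====
-- stated objective: alternative
-- what changed: Replaces A's nested divisor-scanning loops, mutable end list and ans==0 sentinel with a 60-entry table precomputed once mod lcm(2..5)=60: solve does a single dict lookup on n % 60 and applies the closed form j + n//j - 2 (n - 1 when the table says no small divisor).
-- intended difference: On n in {-3, -8, -15} the sum (j-1)+(n//j-1) is accidentally 0, so A's 'ans == 0' sentinel (meant to mean 'no small divisor') misfires and A returns n-1 (-4, -9, -16); B returns the decomposition value j + n//j - 2 = 0, the intended result since a small divisor does exist. — e.g. on solve(-3): A returns -4, B returns 0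
import Mathlib
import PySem

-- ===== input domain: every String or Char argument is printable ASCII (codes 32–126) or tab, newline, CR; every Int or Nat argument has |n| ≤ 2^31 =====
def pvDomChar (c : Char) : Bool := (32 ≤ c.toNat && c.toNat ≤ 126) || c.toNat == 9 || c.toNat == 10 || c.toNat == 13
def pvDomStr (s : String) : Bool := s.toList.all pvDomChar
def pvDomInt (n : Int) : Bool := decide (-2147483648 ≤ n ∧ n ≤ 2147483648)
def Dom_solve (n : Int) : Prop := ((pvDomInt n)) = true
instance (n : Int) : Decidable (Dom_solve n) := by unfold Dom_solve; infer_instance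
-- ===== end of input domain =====

-- B replaces A's nested divisor loops, mutable `end` list and ans==0 sentinel with a precomputed 60-entry residue table (mod lcm(2..5)) looked up once; on n ∈ {-3,-8,-15} A's sentinel misfires and B returns the intended decomposition value.
set_option maxRecDepth 4000


-- ===== PORT A =====
-- inner loop: for j in range(5,1,-1): if n % j == 0: end[0] = j; break   (e0 is end[0]'s old value)
def solveInner (n : Int) (e0 : Int) : Int :=
  (((PySem.List.pyRange 5 1 (-1)).foldl
      (fun (acc : Option Int) j =>
        match acc with
        | some v => some v
        | none => if PySem.Int.mod n j = 0 then some j else none)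
      none).getD e0)

def solve (n : Int) : Int :=
  let _initial : List Int := [1, 1]          -- dead variable kept from A
  let st : (Int × Int) × Bool :=             -- (end, broken); `end` as a pair (e0, e1)
    (PySem.List.pyRange 2 6 1).foldl
      (fun (st : (Int × Int) × Bool) i =>
        if st.2 then st
        else if PySem.Int.mod n i = 0 ∧ st.1 = (1, 1) then
          let e0 := solveInner n st.1.1
          ((e0, PySem.Int.floordiv n e0), true)
        else st)
      ((1, 1), false)
  let ans := (st.1.1 - 1) + (st.1.2 - 1)
  if ans = 0 then n - 1 else ans

-- ===== PORT B =====
-- _TABLE = {r: max((j for j in (2,3,4,5) if r % j == 0), default=0) for r in range(60)}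
def pvTable : PySem.Dict Int Int :=
  (PySem.List.pyRange 0 60 1).foldl
    (fun d r =>
      d.insert r (PySem.List.maxD (([2, 3, 4, 5] : List Int).filter
        (fun j => decide (PySem.Int.mod r j = 0))) (fun x => x) 0))
    PySem.Dict.empty

def solve_alt (n : Int) : Int :=
  -- _TABLE[n % 60]: every residue 0..59 is a key, so the lookup never misses; getD's default is unreachable
  let j := (pvTable.get? (PySem.Int.mod n 60)).getD 0
  if j = 0 then n - 1 else j + PySem.Int.floordiv n j - 2

-- ===== PRECONDITION & SPEC =====
-- On n ∈ {-3, -8, -15} the sum (j-1)+(n//j-1) is accidentally 0, so A's 'ans == 0' sentinel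
-- (meant to mean "no small divisor") misfires and A returns n-1 (-4, -9, -16); B returns the
-- decomposition value j + n//j - 2 = 0, the intended result since a small divisor exists.
def D_solve (n : Int) : Prop := n = -3 ∨ n = -8 ∨ n = -15
instance (n : Int) : Decidable (D_solve n) := by unfold D_solve; infer_instance

def Spec_solve (n : Int) (out : Int) : Prop := ¬ D_solve n → out = solve_alt n
instance (n : Int) (out : Int) : Decidable (Spec_solve n out) := by unfold Spec_solve; infer_instance

def pvDiffWitness_solve : Int := (-3)
def pvDiffWitnessOut_solve : Int × Int := (-4, 0)

-- ===== CLAIM (what is proved, stated in full; the proofs are below) =====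
def Claim_unchanged_solve : Prop := ∀ (n : Int), Dom_solve n → Spec_solve n (solve n)
def Claim_changed_solve : Prop := Dom_solve (pvDiffWitness_solve) ∧ D_solve (pvDiffWitness_solve) ∧ solve (pvDiffWitness_solve) = pvDiffWitnessOut_solve.1 ∧ solve_alt (pvDiffWitness_solve) = pvDiffWitnessOut_solve.2 ∧ pvDiffWitnessOut_solve.1 ≠ pvDiffWitnessOut_solve.2
def Claim_exact_solve : Prop := ∀ (n : Int), Dom_solve n → D_solve n → solve n ≠ solve_alt n

-- ===== LEMMAS AND PROOFS =====

-- the table lookup, characterised by divisibility of the residue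
theorem pvTable_lookup (r : Int) (h0 : 0 ≤ r) (h1 : r < 60) :
    (pvTable.get? r).getD 0 =
      (if (5:Int) ∣ r then 5 else if (4:Int) ∣ r then 4
       else if (3:Int) ∣ r then 3 else if (2:Int) ∣ r then 2 else 0) := by
  interval_cases r <;> decide

-- for j ∣ 60, divisibility of n by j only depends on n % 60
theorem dvd_mod60 (n j : Int) (hj : j ∣ 60) : j ∣ PySem.Int.mod n 60 ↔ j ∣ n := by
  rw [PySem.Int.mod_eq_emod_of_pos (by norm_num : (0:Int) < 60)]
  have h60 : j ∣ 60 * (n / 60) := Dvd.dvd.mul_right hj _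
  have heq : n % 60 = n - 60 * (n / 60) := by
    have := Int.emod_add_ediv n 60; omega
  rw [heq]
  constructor
  · intro h; have := dvd_add h h60; simpa using this
  · intro h; exact dvd_sub h h60

theorem solve_spec : Claim_unchanged_solve := by
  intro n _ hD
  have h3' : n ≠ -3 := fun e => hD (Or.inl e)
  have h4' : n ≠ -8 := fun e => hD (Or.inr (Or.inl e))
  have h5' : n ≠ -15 := fun e => hD (Or.inr (Or.inr e))
  have hR26 : PySem.List.pyRange 2 6 1 = [2, 3, 4, 5] := by decide
  have hR51 : PySem.List.pyRange 5 1 (-1) = [5, 4, 3, 2] := by decide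
  have hr0 : 0 ≤ PySem.Int.mod n 60 := PySem.Int.mod_nonneg (a := n) (by norm_num : (0:Int) < 60)
  have hr1 : PySem.Int.mod n 60 < 60 := PySem.Int.mod_lt (a := n) (by norm_num : (0:Int) < 60)
  have hL := pvTable_lookup _ hr0 hr1
  show solve n = solve_alt n
  by_cases d5 : (5:Int) ∣ n <;>
  by_cases d4 : (4:Int) ∣ n <;>
  by_cases d3 : (3:Int) ∣ n <;>
  by_cases d2 : (2:Int) ∣ n <;>
  · simp only [solve_alt, hL, dvd_mod60 n 5 (by norm_num), dvd_mod60 n 4 (by norm_num),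
      dvd_mod60 n 3 (by norm_num), dvd_mod60 n 2 (by norm_num)]
    simp [solve, solveInner, hR26, hR51, d2, d3, d4, d5,
      PySem.Int.mod_eq_zero_iff_dvd, PySem.Int.floordiv_eq_ediv_of_pos]
    all_goals (first | (split_ifs <;> omega) | omega)

theorem solve_changed : Claim_changed_solve := by
  unfold Claim_changed_solve; decide

theorem solve_tight : Claim_exact_solve := by
  intro n _ hD
  rcases hD with e | e | e <;> subst e <;> decide
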